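-- pv_equiv track=rewrite | github.com/pawar142suraj/classifier | src/docuverse/extractors/hybrid_graph_rag.py | _find_closest_enum_match
-- ===== SOURCE A (Python) =====
-- from typing import Dict, Any, List, Tuple, Optional, Set
--
-- def _find_closest_enum_match(value: str, enum_values: List[str]) -> Optional[str]:
--     """Find closest enum match for a value."""
--     if not isinstance(value, str):
--         return None
--
--     value_lower = value.lower()
--
--     # Exact match
--     for enum_val in enum_values:
--         if value_lower == enum_val.lower():
--             return enum_val
--
--     # Partial match
--     for enum_val in enum_values:
--         if value_lower in enum_val.lower() or enum_val.lower() in value_lower: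
--             return enum_val
--
--     return None
-- ===== SOURCE B (Python) =====
-- from typing import List, Optional
--
-- def _find_closest_enum_match(value: str, enum_values: List[str]) -> Optional[str]:
--     """Single pass: return on exact match; remember the first partial candidate."""
--     if not isinstance(value, str):
--         return None
--     value_lower = value.lower()
--     partial = None
--     for enum_val in enum_values:
--         el = enum_val.lower()
--         if value_lower == el:
--             return enum_val
--         if partial is None and (value_lower in el or el in value_lower):
--             partial = enum_val
--     return partial
-- ===== Notes on version B (the rewrite author's own statement) =====
-- stated objective: alternative
-- what changed: Replaces A's two sequential scans (exact pass, then partial pass) with one stateful pass that returns immediately on an exact match and otherwise remembers the first partial candidate, lowering each enum value once instead of up to three times.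
import Mathlib
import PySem

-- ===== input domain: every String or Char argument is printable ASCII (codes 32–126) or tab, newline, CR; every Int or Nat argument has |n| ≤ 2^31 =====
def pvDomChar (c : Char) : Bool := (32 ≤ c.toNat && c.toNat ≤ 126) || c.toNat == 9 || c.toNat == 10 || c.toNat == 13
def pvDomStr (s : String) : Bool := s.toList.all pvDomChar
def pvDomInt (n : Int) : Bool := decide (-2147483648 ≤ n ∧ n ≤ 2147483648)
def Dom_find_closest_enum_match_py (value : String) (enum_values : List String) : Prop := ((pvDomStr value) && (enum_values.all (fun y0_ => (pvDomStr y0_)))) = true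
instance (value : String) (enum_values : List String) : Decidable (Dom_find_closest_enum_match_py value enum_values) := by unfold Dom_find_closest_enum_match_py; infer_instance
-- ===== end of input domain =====

-- B changes A's two sequential scans into one stateful pass (exact match returns at once,
-- the first partial candidate is remembered); objective: alternative, same cost.

-- ===== PORT A =====
-- 'value' is always a str under the type convention, so the isinstance guard never fires.
def find_closest_enum_match_py (value : String) (enum_values : List String) : Option String :=
  let value_lower := PySem.Str.lower value
  -- Exact match loop
  match enum_values.find? (fun enum_val => value_lower == PySem.Str.lower enum_val) with
  | some enum_val => some enum_val
  | none =>
    -- Partial match loop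
    enum_values.find? (fun enum_val =>
      PySem.Str.isIn value_lower (PySem.Str.lower enum_val) ||
      PySem.Str.isIn (PySem.Str.lower enum_val) value_lower)

-- ===== PORT B =====
def pvAltLoop (value_lower : String) (part : Option String) : List String → Option String
  | [] => part
  | enum_val :: rest =>
    let el := PySem.Str.lower enum_val
    if value_lower == el then some enum_val
    else
      pvAltLoop value_lower
        (if part.isNone && (PySem.Str.isIn value_lower el || PySem.Str.isIn el value_lower)
         then some enum_val else part) rest

def find_closest_enum_match_py_alt (value : String) (enum_values : List String) : Option String :=
  pvAltLoop (PySem.Str.lower value) none enum_values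

-- ===== PRECONDITION & SPEC =====
def Spec_find_closest_enum_match_py (value : String) (enum_values : List String) (out : Option String) : Prop := out = find_closest_enum_match_py_alt value enum_values
instance (value : String) (enum_values : List String) (out : Option String) : Decidable (Spec_find_closest_enum_match_py value enum_values out) := by unfold Spec_find_closest_enum_match_py; infer_instance

-- ===== CLAIM (what is proved, stated in full; the proofs are below) =====
def Claim_equal_find_closest_enum_match_py : Prop := ∀ (value : String) (enum_values : List String), Dom_find_closest_enum_match_py value enum_values → Spec_find_closest_enum_match_py value enum_values (find_closest_enum_match_py value enum_values)

-- ===== LEMMAS AND PROOFS =====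

-- B's single pass equals: exact-match find?, else (stored candidate, else partial-match find?).
lemma pvAltLoop_eq (vl : String) (p : Option String) (xs : List String) :
    pvAltLoop vl p xs =
      match xs.find? (fun e => vl == PySem.Str.lower e) with
      | some e => some e
      | none => p.or (xs.find? (fun e =>
          PySem.Str.isIn vl (PySem.Str.lower e) || PySem.Str.isIn (PySem.Str.lower e) vl)) := by
  induction xs generalizing p with
  | nil => cases p <;> simp [pvAltLoop]
  | cons e rest ih =>
    by_cases hex : (vl == PySem.Str.lower e) = true
    · simp [pvAltLoop, hex]
    · simp only [pvAltLoop, Bool.not_eq_true] at *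
      rw [if_neg (by simp [hex]), ih]
      cases hfe : rest.find? (fun e => vl == PySem.Str.lower e) <;>
        by_cases hpar : (PySem.Chars.isIn vl.toList (PySem.Chars.lower e.toList) ||
            PySem.Chars.isIn (PySem.Chars.lower e.toList) vl.toList) = true <;>
          cases p <;> simp [List.find?, hex, hpar, hfe]

theorem pv_main (value : String) (enum_values : List String) :
    find_closest_enum_match_py value enum_values = find_closest_enum_match_py_alt value enum_values := by
  unfold find_closest_enum_match_py find_closest_enum_match_py_alt
  rw [pvAltLoop_eq]
  cases hfe : enum_values.find? (fun e => PySem.Str.lower value == PySem.Str.lower e) <;>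
    simp [hfe]

-- ===== VERDICT (by name: the statement is the Claim_ definition above) =====
theorem find_closest_enum_match_py_spec : Claim_equal_find_closest_enum_match_py := by
  intro value enum_values _
  unfold Spec_find_closest_enum_match_py
  exact pv_main value enum_values
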